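-- pv_equiv track=rewrite | github.com/caromedellin/tweets-sounds | scale.py | stepChord
-- ===== SOURCE A (Python) =====
-- def stepChord(old_note, steps, chord):
--     if steps == 0:
--         return old_note
--     else:
--         new_note = old_note
--         step_count = 0
--         if steps > 0:
--             while (step_count < steps):
--                 new_note += 1
--                 if new_note % 7 in [j % 7 for j in chord]:
--                     step_count += 1
--         else:
--             while (step_count > steps):
--                 new_note -= 1
--                 if new_note % 7 in [j % 7 for j in chord]:
--                     step_count -= 1
--         return new_note
-- ===== SOURCE B (Python) =====
-- def stepChord(old_note, steps, chord):
--     # Closed form: jump whole 7-periods, pick the remainder offset from a precomputed table.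
--     if steps == 0:
--         return old_note
--     res = {j % 7 for j in chord}
--     k = len(res)
--     sign = 1 if steps > 0 else -1
--     offs = [d for d in range(1, 8) if (old_note + sign * d) % 7 in res]
--     q, r = divmod(abs(steps) - 1, k)
--     return old_note + sign * (7 * q + offs[r])
-- ===== Notes on version B (the rewrite author's own statement) =====
-- stated objective: faster
-- what changed: B replaces A's note-by-note while loop (re-building the chord residue list each iteration) by a closed form: it precomputes the set of chord residues mod 7 and the at-most-7 step offsets around old_note, then jumps whole 7-periods with divmod and indexes the remainder offset.
import Mathlib
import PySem

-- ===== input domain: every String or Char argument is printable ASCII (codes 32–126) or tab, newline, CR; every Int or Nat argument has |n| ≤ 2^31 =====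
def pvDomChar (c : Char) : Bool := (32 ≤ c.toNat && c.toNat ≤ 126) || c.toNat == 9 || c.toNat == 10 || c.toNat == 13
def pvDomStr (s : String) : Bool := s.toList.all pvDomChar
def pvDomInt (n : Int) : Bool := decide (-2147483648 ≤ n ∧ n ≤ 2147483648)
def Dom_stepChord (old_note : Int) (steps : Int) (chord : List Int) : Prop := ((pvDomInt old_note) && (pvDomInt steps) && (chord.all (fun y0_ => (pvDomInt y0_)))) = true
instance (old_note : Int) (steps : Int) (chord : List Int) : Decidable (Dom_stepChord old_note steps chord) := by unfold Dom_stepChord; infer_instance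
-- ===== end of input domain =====

-- B replaces A's note-by-note while loop by a closed form over the chord's residues mod 7
-- (precomputed offset table + whole-7-period jump); proved equal wherever A terminates.


-- ===== PORT A =====
-- `new_note % 7 in [j % 7 for j in chord]`
def stepChord.hitA (chord : List Int) (new_note : Int) : Bool :=
  decide (PySem.Int.mod new_note 7 ∈ chord.map (fun j => PySem.Int.mod j 7))

-- the `while (step_count < steps)` loop; the fuel only makes the recursion total:
-- whenever chord ≠ [] the loop finishes in ≤ 7·steps iterations, so the fuel is never exhausted on Pre_.
def stepChord.loopUp (chord : List Int) (steps : Int) : Nat → Int → Int → Int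
  | 0, new_note, _ => new_note
  | fuel + 1, new_note, step_count =>
    if step_count < steps then
      stepChord.loopUp chord steps fuel (new_note + 1)
        (if stepChord.hitA chord (new_note + 1) then step_count + 1 else step_count)
    else new_note

-- the `while (step_count > steps)` loop
def stepChord.loopDown (chord : List Int) (steps : Int) : Nat → Int → Int → Int
  | 0, new_note, _ => new_note
  | fuel + 1, new_note, step_count =>
    if step_count > steps then
      stepChord.loopDown chord steps fuel (new_note - 1)
        (if stepChord.hitA chord (new_note - 1) then step_count - 1 else step_count)
    else new_note

def stepChord (old_note : Int) (steps : Int) (chord : List Int) : Int :=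
  if steps = 0 then old_note
  else if steps > 0 then stepChord.loopUp chord steps (7 * steps.toNat) old_note 0
  else stepChord.loopDown chord steps (7 * (-steps).toNat) old_note 0

-- ===== PORT B =====
def stepChord_alt (old_note : Int) (steps : Int) (chord : List Int) : Int :=
  if steps = 0 then old_note
  else
    let res : PySem.Set Int := PySem.Set.ofList (chord.map (fun j => PySem.Int.mod j 7))
    let sign : Int := if steps > 0 then 1 else -1
    let offs : List Int :=
      (PySem.List.pyRange 1 8 1).filter
        (fun d => PySem.Set.contains res (PySem.Int.mod (old_note + sign * d) 7))
    -- q, r = divmod(abs(steps) - 1, k); Python raises ZeroDivisionError when k = 0 (chord empty),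
    -- which is outside Pre_; the `none` branch is unreachable there.
    match PySem.Int.divmod? (|steps| - 1) (PySem.List.len res) with
    | some (q, r) => old_note + sign * (7 * q + PySem.List.pyGetD offs r 0)
    | none => old_note

-- ===== PRECONDITION & SPEC =====
-- Pre_ excludes only steps ≠ 0 with an empty chord: there A never returns (its while loop finds no
-- chord tone and runs forever), and B raises ZeroDivisionError.
def Pre_stepChord (old_note : Int) (steps : Int) (chord : List Int) : Prop :=
  steps = 0 ∨ chord ≠ []
instance (old_note : Int) (steps : Int) (chord : List Int) : Decidable (Pre_stepChord old_note steps chord) := by unfold Pre_stepChord; infer_instance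
def pvWitness_stepChord : Int × Int × List Int := (60, 3, [0, 2, 4])

def Spec_stepChord (old_note : Int) (steps : Int) (chord : List Int) (out : Int) : Prop := out = stepChord_alt old_note steps chord
instance (old_note : Int) (steps : Int) (chord : List Int) (out : Int) : Decidable (Spec_stepChord old_note steps chord out) := by unfold Spec_stepChord; infer_instance

-- ===== CLAIM (what is proved, stated in full; the proofs are below) =====
def Claim_equal_stepChord : Prop := ∀ (old_note : Int) (steps : Int) (chord : List Int), Dom_stepChord old_note steps chord → Pre_stepChord old_note steps chord → Spec_stepChord old_note steps chord (stepChord old_note steps chord)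

-- ===== LEMMAS AND PROOFS =====

-- Abstract window model: a boolean pattern w on the 7 residue positions around the start note.
def pvFin (n : Nat) : Fin 7 := ⟨n % 7, Nat.mod_lt n (by norm_num)⟩

/-- `pvHit w p` = "position p (p ≥ 1 steps away from the start) is a chord tone". -/
def pvHit (w : Fin 7 → Bool) (p : Nat) : Bool := w (pvFin (p + 6))

/-- distance from position p to the next chord tone (1..7). -/
def pvDelta (w : Fin 7 → Bool) (p : Nat) : Nat :=
  if pvHit w (p + 1) then 1 else if pvHit w (p + 2) then 2 else if pvHit w (p + 3) then 3
  else if pvHit w (p + 4) then 4 else if pvHit w (p + 5) then 5 else if pvHit w (p + 6) then 6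
  else 7

def pvIter (w : Fin 7 → Bool) : Nat → Nat → Nat
  | 0, p => p
  | t + 1, p => pvIter w t (p + pvDelta w p)

def pvK (w : Fin 7 → Bool) : Nat := ((List.range 7).filter (fun j => w (pvFin j))).length

def pvOffs (w : Fin 7 → Bool) : List Nat :=
  ((List.range 7).filter (fun j => w (pvFin j))).map (· + 1)

lemma pvFin_val (n : Nat) : ((pvFin n : Fin 7) : Nat) = n % 7 := rfl

lemma pvHit_congr (w : Fin 7 → Bool) {a b : Nat} (h : a % 7 = b % 7) : pvHit w a = pvHit w b := by
  unfold pvHit pvFin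
  congr 1
  exact Fin.ext (by simp; omega)

lemma pvDelta_congr (w : Fin 7 → Bool) {a b : Nat} (h : a % 7 = b % 7) :
    pvDelta w a = pvDelta w b := by
  unfold pvDelta
  rw [pvHit_congr w (a := a+1) (b := b+1) (by omega),
      pvHit_congr w (a := a+2) (b := b+2) (by omega),
      pvHit_congr w (a := a+3) (b := b+3) (by omega),
      pvHit_congr w (a := a+4) (b := b+4) (by omega),
      pvHit_congr w (a := a+5) (b := b+5) (by omega),
      pvHit_congr w (a := a+6) (b := b+6) (by omega)]

lemma pvDelta_bounds (w : Fin 7 → Bool) (p : Nat) : 1 ≤ pvDelta w p ∧ pvDelta w p ≤ 7 := by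
  unfold pvDelta; split_ifs <;> omega

set_option maxRecDepth 40000 in
lemma pvNohit_dec : ∀ w : Fin 7 → Bool, ∀ p < 7, ∀ i < 7, 1 ≤ i → i < pvDelta w p →
    pvHit w (p + i) = false := by decide

lemma pvNohit (w : Fin 7 → Bool) (p i : Nat) (h1 : 1 ≤ i) (h2 : i < pvDelta w p) :
    pvHit w (p + i) = false := by
  have hd : pvDelta w p = pvDelta w (p % 7) := pvDelta_congr w (by omega)
  have hh : pvHit w (p + i) = pvHit w (p % 7 + i) := pvHit_congr w (by omega)
  rw [hh]
  exact pvNohit_dec w (p % 7) (by omega) i (by have := pvDelta_bounds w p; omega) h1 (by omega)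

set_option maxRecDepth 40000 in
lemma pvHitDelta_dec : ∀ w : Fin 7 → Bool, (∃ j, w j = true) → ∀ p < 7,
    pvHit w (p + pvDelta w p) = true := by decide

lemma pvHitDelta (w : Fin 7 → Bool) (hw : ∃ j, w j = true) (p : Nat) :
    pvHit w (p + pvDelta w p) = true := by
  have hd : pvDelta w p = pvDelta w (p % 7) := pvDelta_congr w (by omega)
  rw [hd, pvHit_congr w (a := p + pvDelta w (p % 7)) (b := p % 7 + pvDelta w (p % 7)) (by omega)]
  exact pvHitDelta_dec w hw (p % 7) (by omega)

lemma pvK_le7 (w : Fin 7 → Bool) : pvK w ≤ 7 := by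
  have := List.length_filter_le (fun j => w (pvFin j)) (List.range 7)
  simpa [pvK] using this

set_option maxRecDepth 40000 in
lemma pvBase_dec : ∀ w : Fin 7 → Bool, ∀ r < 7, r < pvK w →
    pvIter w (r + 1) 0 = (pvOffs w).getD r 0 := by decide

set_option maxRecDepth 40000 in
lemma pvJump_dec : ∀ w : Fin 7 → Bool, ∀ r < 7, r < pvK w →
    pvIter w (pvK w) ((pvOffs w).getD r 0) = (pvOffs w).getD r 0 + 7 := by decide

lemma pvIter_add (w : Fin 7 → Bool) (s t p : Nat) :
    pvIter w (s + t) p = pvIter w t (pvIter w s p) := by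
  induction s generalizing p with
  | zero => simp [pvIter]
  | succ s ih =>
      have : s + 1 + t = (s + t) + 1 := by omega
      rw [this]
      show pvIter w (s + t) (p + pvDelta w p) = _
      rw [ih]
      rfl

lemma pvIter_add7 (w : Fin 7 → Bool) (t p : Nat) : pvIter w t (p + 7) = pvIter w t p + 7 := by
  induction t generalizing p with
  | zero => rfl
  | succ t ih =>
      show pvIter w t (p + 7 + pvDelta w (p + 7)) = pvIter w t (p + pvDelta w p) + 7
      have hd : pvDelta w (p + 7) = pvDelta w p := pvDelta_congr w (by omega)
      rw [hd, show p + 7 + pvDelta w p = (p + pvDelta w p) + 7 by omega, ih]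

lemma pvIter_add_mul7 (w : Fin 7 → Bool) (t p a : Nat) :
    pvIter w t (p + 7 * a) = pvIter w t p + 7 * a := by
  induction a with
  | zero => simp
  | succ a ih =>
      rw [show p + 7 * (a + 1) = (p + 7 * a) + 7 by omega, pvIter_add7, ih]
      omega

lemma pvFormula (w : Fin 7 → Bool) (q r : Nat) (hr : r < pvK w) :
    pvIter w (q * pvK w + r + 1) 0 = 7 * q + (pvOffs w).getD r 0 := by
  induction q with
  | zero => simpa using pvBase_dec w r (by have := pvK_le7 w; omega) hr
  | succ q ih =>
      have h1 : (q + 1) * pvK w + r + 1 = (q * pvK w + r + 1) + pvK w := by ring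
      rw [h1, pvIter_add, ih,
          show 7 * q + (pvOffs w).getD r 0 = (pvOffs w).getD r 0 + 7 * q by omega,
          pvIter_add_mul7, pvJump_dec w r (by have := pvK_le7 w; omega) hr]
      omega

-- Bridge: hitA is 7-periodic in its note argument.
lemma pvHitA_congr (chord : List Int) {x y : Int} (h : x % 7 = y % 7) :
    stepChord.hitA chord x = stepChord.hitA chord y := by
  unfold stepChord.hitA
  rw [PySem.Int.mod_eq_emod_of_pos (by norm_num), PySem.Int.mod_eq_emod_of_pos (by norm_num), h]

-- the residue window that the up-going loop sees from note m
def pvWUp (chord : List Int) (m : Int) : Fin 7 → Bool :=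
  fun j => stepChord.hitA chord (m + 1 + (j : Nat))

def pvWDown (chord : List Int) (m : Int) : Fin 7 → Bool :=
  fun j => stepChord.hitA chord (m - 1 - (j : Nat))

lemma pvHit_wUp (chord : List Int) (m : Int) (p : Nat) :
    pvHit (pvWUp chord m) p = stepChord.hitA chord (m + p) := by
  unfold pvHit pvWUp pvFin
  exact pvHitA_congr chord (by push_cast; omega)

lemma pvHit_wDown (chord : List Int) (m : Int) (p : Nat) :
    pvHit (pvWDown chord m) p = stepChord.hitA chord (m - p) := by
  unfold pvHit pvWDown pvFin
  exact pvHitA_congr chord (by push_cast; omega)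

lemma pvW_nonempty_up (chord : List Int) (m : Int) (hc : chord ≠ []) :
    ∃ j, pvWUp chord m j = true := by
  obtain ⟨x, hx⟩ : ∃ x, x ∈ chord := by
    cases chord with
    | nil => exact absurd rfl hc
    | cons a l => exact ⟨a, List.mem_cons_self⟩
  have h7 : (0:Int) < 7 := by norm_num
  set r : Int := PySem.Int.mod x 7 with hr
  have hr0 : 0 ≤ r := PySem.Int.mod_nonneg x h7
  have hr7 : r < 7 := PySem.Int.mod_lt x h7
  refine ⟨⟨((r - m - 1) % 7).toNat, by omega⟩, ?_⟩
  unfold pvWUp stepChord.hitA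
  simp only [decide_eq_true_eq]
  have harg : PySem.Int.mod (m + 1 + (((r - m - 1) % 7).toNat : Nat)) 7 = r := by
    rw [PySem.Int.mod_eq_emod_of_pos h7]
    omega
  rw [harg]
  exact List.mem_map.mpr ⟨x, hx, rfl⟩

lemma pvW_nonempty_down (chord : List Int) (m : Int) (hc : chord ≠ []) :
    ∃ j, pvWDown chord m j = true := by
  obtain ⟨x, hx⟩ : ∃ x, x ∈ chord := by
    cases chord with
    | nil => exact absurd rfl hc
    | cons a l => exact ⟨a, List.mem_cons_self⟩
  have h7 : (0:Int) < 7 := by norm_num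
  set r : Int := PySem.Int.mod x 7 with hr
  have hr0 : 0 ≤ r := PySem.Int.mod_nonneg x h7
  have hr7 : r < 7 := PySem.Int.mod_lt x h7
  refine ⟨⟨((m - 1 - r) % 7).toNat, by omega⟩, ?_⟩
  unfold pvWDown stepChord.hitA
  simp only [decide_eq_true_eq]
  have harg : PySem.Int.mod (m - 1 - (((m - 1 - r) % 7).toNat : Nat)) 7 = r := by
    rw [PySem.Int.mod_eq_emod_of_pos h7]
    omega
  rw [harg]
  exact List.mem_map.mpr ⟨x, hx, rfl⟩

-- loop ↔ iterate, upward
lemma pvLoopUp_scan (chord : List Int) (steps m : Int) :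
    ∀ d, 1 ≤ d → ∀ fuel p (c : Int), c < steps → d ≤ fuel →
    (∀ i, 1 ≤ i → i < d → pvHit (pvWUp chord m) (p + i) = false) →
    pvHit (pvWUp chord m) (p + d) = true →
    stepChord.loopUp chord steps fuel (m + (p : Nat)) c
      = stepChord.loopUp chord steps (fuel - d) (m + ((p + d : Nat) : Int)) (c + 1) := by
  intro d
  induction d with
  | zero => omega
  | succ d ih =>
      intro _ fuel p c hc hfuel hno hyes
      obtain ⟨f, rfl⟩ : ∃ f, fuel = f + 1 := ⟨fuel - 1, by omega⟩
      simp only [stepChord.loopUp, if_pos hc]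
      have hnote : m + (p : Int) + 1 = m + ((p + 1 : Nat) : Int) := by push_cast; ring
      rcases Nat.eq_zero_or_pos d with hd0 | hd1
      · subst hd0
        have hhit : stepChord.hitA chord (m + (p : Int) + 1) = true := by
          rw [hnote, ← pvHit_wUp chord m (p + 1)]
          exact hyes
        rw [hhit, hnote]
        simp
      · have hmiss : stepChord.hitA chord (m + (p : Int) + 1) = false := by
          rw [hnote, ← pvHit_wUp chord m (p + 1)]
          exact hno 1 (by omega) (by omega)
        rw [hmiss, hnote]
        simp only [Bool.false_eq_true, if_false]
        have := ih hd1 f (p + 1) c hc (by omega)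
          (fun i h1 h2 => by
            have := hno (i + 1) (by omega) (by omega)
            rwa [show p + (i + 1) = p + 1 + i by omega] at this)
          (by rwa [show p + 1 + d = p + (d + 1) by omega])
        rw [this, show f - d = f + 1 - (d + 1) by omega,
            show p + 1 + d = p + (d + 1) by omega]

lemma pvLoopUp_main (chord : List Int) (steps m : Int) (hc : chord ≠ []) :
    ∀ t fuel p (c : Int), c + (t : Nat) = steps → 7 * t ≤ fuel →
    stepChord.loopUp chord steps fuel (m + (p : Nat)) c
      = m + (pvIter (pvWUp chord m) t p : Nat) := by
  intro t
  induction t with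
  | zero =>
      intro fuel p c hcs _
      have hns : ¬ c < steps := by push_cast at hcs; omega
      cases fuel with
      | zero => rfl
      | succ f => simp [stepChord.loopUp, hns, pvIter]
  | succ t ih =>
      intro fuel p c hcs hfuel
      have hclt : c < steps := by push_cast at hcs; omega
      have hb := pvDelta_bounds (pvWUp chord m) p
      rw [pvLoopUp_scan chord steps m (pvDelta (pvWUp chord m) p) (by omega) fuel p c hclt
            (by omega) (fun i h1 h2 => pvNohit _ p i h1 h2)
            (pvHitDelta _ (pvW_nonempty_up chord m hc) p)]
      rw [ih (fuel - pvDelta (pvWUp chord m) p) (p + pvDelta (pvWUp chord m) p) (c + 1)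
            (by push_cast at hcs ⊢; omega) (by omega)]
      rfl

-- loop ↔ iterate, downward
lemma pvLoopDown_scan (chord : List Int) (steps m : Int) :
    ∀ d, 1 ≤ d → ∀ fuel p (c : Int), c > steps → d ≤ fuel →
    (∀ i, 1 ≤ i → i < d → pvHit (pvWDown chord m) (p + i) = false) →
    pvHit (pvWDown chord m) (p + d) = true →
    stepChord.loopDown chord steps fuel (m - (p : Nat)) c
      = stepChord.loopDown chord steps (fuel - d) (m - ((p + d : Nat) : Int)) (c - 1) := by
  intro d
  induction d with
  | zero => omega
  | succ d ih =>
      intro _ fuel p c hc hfuel hno hyes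
      obtain ⟨f, rfl⟩ : ∃ f, fuel = f + 1 := ⟨fuel - 1, by omega⟩
      simp only [stepChord.loopDown, if_pos hc]
      have hnote : m - (p : Int) - 1 = m - ((p + 1 : Nat) : Int) := by push_cast; ring
      rcases Nat.eq_zero_or_pos d with hd0 | hd1
      · subst hd0
        have hhit : stepChord.hitA chord (m - (p : Int) - 1) = true := by
          rw [hnote, ← pvHit_wDown chord m (p + 1)]
          exact hyes
        rw [hhit, hnote]
        simp
      · have hmiss : stepChord.hitA chord (m - (p : Int) - 1) = false := by
          rw [hnote, ← pvHit_wDown chord m (p + 1)]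
          exact hno 1 (by omega) (by omega)
        rw [hmiss, hnote]
        simp only [Bool.false_eq_true, if_false]
        have := ih hd1 f (p + 1) c hc (by omega)
          (fun i h1 h2 => by
            have := hno (i + 1) (by omega) (by omega)
            rwa [show p + (i + 1) = p + 1 + i by omega] at this)
          (by rwa [show p + 1 + d = p + (d + 1) by omega])
        rw [this, show f - d = f + 1 - (d + 1) by omega,
            show p + 1 + d = p + (d + 1) by omega]

lemma pvLoopDown_main (chord : List Int) (steps m : Int) (hc : chord ≠ []) :
    ∀ t fuel p (c : Int), c - (t : Nat) = steps → 7 * t ≤ fuel →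
    stepChord.loopDown chord steps fuel (m - (p : Nat)) c
      = m - (pvIter (pvWDown chord m) t p : Nat) := by
  intro t
  induction t with
  | zero =>
      intro fuel p c hcs _
      have hns : ¬ c > steps := by push_cast at hcs; omega
      cases fuel with
      | zero => rfl
      | succ f => simp [stepChord.loopDown, hns, pvIter]
  | succ t ih =>
      intro fuel p c hcs hfuel
      have hclt : c > steps := by push_cast at hcs; omega
      have hb := pvDelta_bounds (pvWDown chord m) p
      rw [pvLoopDown_scan chord steps m (pvDelta (pvWDown chord m) p) (by omega) fuel p c hclt
            (by omega) (fun i h1 h2 => pvNohit _ p i h1 h2)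
            (pvHitDelta _ (pvW_nonempty_down chord m hc) p)]
      rw [ih (fuel - pvDelta (pvWDown chord m) p) (p + pvDelta (pvWDown chord m) p) (c - 1)
            (by push_cast at hcs ⊢; omega) (by omega)]
      rfl

-- A's value in terms of the abstract model
lemma pvA_up (chord : List Int) (steps m : Int) (hs : 0 < steps) (hc : chord ≠ []) :
    stepChord m steps chord = m + (pvIter (pvWUp chord m) steps.toNat 0 : Nat) := by
  unfold stepChord
  rw [if_neg (by omega), if_pos hs]
  have := pvLoopUp_main chord steps m hc steps.toNat (7 * steps.toNat) 0 0
    (by omega) (le_refl _)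
  simpa using this

lemma pvA_down (chord : List Int) (steps m : Int) (hs : steps < 0) (hc : chord ≠ []) :
    stepChord m steps chord = m - (pvIter (pvWDown chord m) (-steps).toNat 0 : Nat) := by
  unfold stepChord
  rw [if_neg (by omega), if_neg (by omega)]
  have := pvLoopDown_main chord steps m hc (-steps).toNat (7 * (-steps).toNat) 0 0
    (by omega) (le_refl _)
  simpa using this

-- ===== B side =====
-- the residue indicator on 0..6
def pvU (chord : List Int) : Fin 7 → Bool :=
  fun i => decide ((((i : Nat) : Int)) ∈ chord.map (fun j => PySem.Int.mod j 7))

set_option maxRecDepth 40000 in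
lemma pvK_pos (w : Fin 7 → Bool) (hw : ∃ j, w j = true) : 0 < pvK w := by
  revert hw
  revert w
  decide

set_option maxRecDepth 40000 in
lemma pvShiftAdd_dec : ∀ u : Fin 7 → Bool, ∀ c < 7,
    pvK (fun (j : Fin 7) => u (pvFin (c + j.val))) = pvK u := by decide

set_option maxRecDepth 40000 in
lemma pvShiftSub_dec : ∀ u : Fin 7 → Bool, ∀ c < 7,
    pvK (fun (j : Fin 7) => u (pvFin (c + 7 - j.val))) = pvK u := by decide

lemma pvWUp_shift (chord : List Int) (m : Int) :
    pvWUp chord m = fun (j : Fin 7) => pvU chord (pvFin (((m + 1) % 7).toNat + j.val)) := by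
  funext j
  have harg : PySem.Int.mod (m + 1 + (j.val : Int)) 7
      = ((((((m + 1) % 7).toNat + j.val) % 7 : Nat)) : Int) := by
    rw [PySem.Int.mod_eq_emod_of_pos (by norm_num)]
    have h1 : (0:Int) ≤ (m + 1) % 7 := Int.emod_nonneg _ (by norm_num)
    have h2 : (m + 1) % 7 < 7 := Int.emod_lt_of_pos _ (by norm_num)
    push_cast
    omega
  show stepChord.hitA chord (m + 1 + (j.val : Int)) = _
  simp only [stepChord.hitA, pvU, pvFin_val, harg]
  rfl

lemma pvWDown_shift (chord : List Int) (m : Int) :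
    pvWDown chord m = fun (j : Fin 7) => pvU chord (pvFin (((m - 1) % 7).toNat + 7 - j.val)) := by
  funext j
  have harg : PySem.Int.mod (m - 1 - (j.val : Int)) 7
      = ((((((m - 1) % 7).toNat + 7 - j.val) % 7 : Nat)) : Int) := by
    rw [PySem.Int.mod_eq_emod_of_pos (by norm_num)]
    have h1 : (0:Int) ≤ (m - 1) % 7 := Int.emod_nonneg _ (by norm_num)
    have h2 : (m - 1) % 7 < 7 := Int.emod_lt_of_pos _ (by norm_num)
    have hj := j.isLt
    push_cast
    omega
  show stepChord.hitA chord (m - 1 - (j.val : Int)) = _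
  simp only [stepChord.hitA, pvU, pvFin_val, harg]
  rfl

lemma pvK_wUp (chord : List Int) (m : Int) : pvK (pvWUp chord m) = pvK (pvU chord) := by
  rw [pvWUp_shift]
  exact pvShiftAdd_dec (pvU chord) (((m + 1) % 7).toNat)
    (by
      have h2 : (m + 1) % 7 < 7 := Int.emod_lt_of_pos _ (by norm_num)
      have h1 : (0:Int) ≤ (m + 1) % 7 := Int.emod_nonneg _ (by norm_num)
      omega)

lemma pvK_wDown (chord : List Int) (m : Int) : pvK (pvWDown chord m) = pvK (pvU chord) := by
  rw [pvWDown_shift]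
  exact pvShiftSub_dec (pvU chord) (((m - 1) % 7).toNat)
    (by
      have h2 : (m - 1) % 7 < 7 := Int.emod_lt_of_pos _ (by norm_num)
      have h1 : (0:Int) ≤ (m - 1) % 7 := Int.emod_nonneg _ (by norm_num)
      omega)

-- the length of set(residues) is pvK
lemma pvLen_res (chord : List Int) :
    (PySem.Set.ofList (chord.map (fun j => PySem.Int.mod j 7))).length = pvK (pvU chord) := by
  have hmemL : ∀ x : Int, (∃ a ∈ chord, PySem.Int.mod a 7 = x) → 0 ≤ x ∧ x < 7 := by
    rintro x ⟨j, _, rfl⟩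
    exact ⟨PySem.Int.mod_nonneg j (by norm_num), PySem.Int.mod_lt j (by norm_num)⟩
  have hL : pvK (pvU chord)
      = (((List.range 7).filter (fun j => pvU chord (pvFin j))).map
          (fun (n : Nat) => (n : Int))).length := by
    simp [pvK]
  rw [hL]
  refine (((List.perm_ext_iff_of_nodup ?_ (PySem.Set.nodup_ofList _)).mpr ?_).length_eq).symm
  · exact ((List.nodup_range).filter _).map (fun a b h => by exact_mod_cast h)
  · intro x
    simp only [List.mem_map, List.mem_filter, List.mem_range, PySem.Set.mem_ofList, pvU,
      pvFin_val, decide_eq_true_eq]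
    constructor
    · rintro ⟨j, ⟨hj7, hju⟩, rfl⟩
      rw [Nat.mod_eq_of_lt hj7] at hju
      exact hju
    · intro hx
      obtain ⟨h0, h7⟩ := hmemL x hx
      refine ⟨x.toNat, ⟨by omega, ?_⟩, by omega⟩
      rw [Nat.mod_eq_of_lt (by omega), Int.toNat_of_nonneg h0]
      exact hx

lemma pvGetD_map_cast (l : List Nat) (n : Nat) :
    (l.map (fun (x : Nat) => (x : Int))).getD n 0 = ((l.getD n 0 : Nat) : Int) := by
  induction l generalizing n with
  | nil => simp [List.getD]
  | cons a l ih =>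
      cases n with
      | zero => simp [List.getD]
      | succ n => simpa [List.getD] using ih n

-- B's offset list is pvOffs
lemma pvOffs_filter (f : Int → Bool) (w : Fin 7 → Bool)
    (h : ∀ j : Fin 7, f ((j : Nat) + 1) = w j) :
    (PySem.List.pyRange 1 8 1).filter f = (pvOffs w).map (fun (n : Nat) => (n : Int)) := by
  have hrange : PySem.List.pyRange 1 8 1 = (List.range 7).map (fun (k : Nat) => 1 + (k : Int)) := by
    rw [PySem.List.pyRange_one]; rfl
  rw [hrange, List.filter_map]
  unfold pvOffs
  rw [List.map_map, List.filter_congr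
    (by
      intro k hk
      have hk7 : k < 7 := List.mem_range.mp hk
      show f (1 + (k : Int)) = w (pvFin k)
      have hfin : pvFin k = ⟨k, hk7⟩ := Fin.ext (by simp [pvFin, Nat.mod_eq_of_lt hk7])
      rw [hfin, ← h ⟨k, hk7⟩]
      norm_num [add_comm])]
  refine List.map_congr_left ?_
  intro j _
  simp
  ring

-- B's value in terms of the abstract model
lemma pvAlt_up (chord : List Int) (steps m : Int) (hs : 0 < steps) (hc : chord ≠ []) :
    stepChord_alt m steps chord = m + (pvIter (pvWUp chord m) steps.toNat 0 : Nat) := by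
  have hk : 0 < pvK (pvWUp chord m) := pvK_pos _ (pvW_nonempty_up chord m hc)
  unfold stepChord_alt
  rw [if_neg (by omega)]
  simp only [if_pos hs, abs_of_pos hs, one_mul]
  have hlen : PySem.List.len (PySem.Set.ofList (List.map (fun j => PySem.Int.mod j 7) chord))
      = ((pvK (pvWUp chord m) : Nat) : Int) := by
    rw [PySem.List.len_eq]
    exact_mod_cast congrArg (fun n : Nat => (n : Int))
      ((pvLen_res chord).trans (pvK_wUp chord m).symm)
  rw [hlen]
  have hsub : steps - 1 = ((steps.toNat - 1 : Nat) : Int) := by omega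
  have hdm : PySem.Int.divmod? ((steps.toNat - 1 : Nat) : Int) ((pvK (pvWUp chord m) : Nat) : Int)
      = some (PySem.Int.floordiv ((steps.toNat - 1 : Nat) : Int) ((pvK (pvWUp chord m) : Nat) : Int),
              PySem.Int.mod ((steps.toNat - 1 : Nat) : Int) ((pvK (pvWUp chord m) : Nat) : Int)) := by
    simp [PySem.Int.divmod?, PySem.Int.floordiv, PySem.Int.mod]
    omega
  rw [PySem.Int.floordiv_natCast, PySem.Int.mod_natCast] at hdm
  rw [hsub, hdm]
  dsimp only
  have hoffs : List.filter
      (fun d => (PySem.Set.ofList (List.map (fun j => PySem.Int.mod j 7) chord)).contains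
        (PySem.Int.mod (m + d) 7)) (PySem.List.pyRange 1 8 1)
      = (pvOffs (pvWUp chord m)).map (fun (n : Nat) => (n : Int)) := by
    refine pvOffs_filter _ _ (fun j => ?_)
    show (PySem.Set.ofList (List.map (fun j => PySem.Int.mod j 7) chord)).contains
        (PySem.Int.mod (m + ((j.val : Int) + 1)) 7) = pvWUp chord m j
    rw [show m + ((j.val : Int) + 1) = m + 1 + (j.val : Int) by ring]
    unfold pvWUp stepChord.hitA
    simp [PySem.Set.contains, PySem.Set.mem_ofList]
  rw [hoffs]
  have hget : PySem.List.pyGetD ((pvOffs (pvWUp chord m)).map (fun (n : Nat) => (n : Int)))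
      (((steps.toNat - 1) % pvK (pvWUp chord m) : Nat) : Int) 0
      = (((pvOffs (pvWUp chord m)).getD ((steps.toNat - 1) % pvK (pvWUp chord m)) 0 : Nat) : Int) := by
    rw [PySem.List.pyGetD_natCast]
    exact pvGetD_map_cast _ _
  rw [hget]
  have hsplit : steps.toNat
      = (steps.toNat - 1) / pvK (pvWUp chord m) * pvK (pvWUp chord m)
        + (steps.toNat - 1) % pvK (pvWUp chord m) + 1 := by
    have := Nat.div_add_mod (steps.toNat - 1) (pvK (pvWUp chord m))
    have hcomm := Nat.mul_comm ((steps.toNat - 1) / pvK (pvWUp chord m)) (pvK (pvWUp chord m))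
    omega
  conv_rhs => rw [hsplit, pvFormula _ _ _ (Nat.mod_lt _ hk)]
  push_cast
  ring

lemma pvAlt_down (chord : List Int) (steps m : Int) (hs : steps < 0) (hc : chord ≠ []) :
    stepChord_alt m steps chord = m - (pvIter (pvWDown chord m) (-steps).toNat 0 : Nat) := by
  have hk : 0 < pvK (pvWDown chord m) := pvK_pos _ (pvW_nonempty_down chord m hc)
  unfold stepChord_alt
  rw [if_neg (by omega)]
  simp only [if_neg (by omega : ¬ steps > 0), abs_of_neg hs, neg_one_mul]
  have hlen : PySem.List.len (PySem.Set.ofList (List.map (fun j => PySem.Int.mod j 7) chord))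
      = ((pvK (pvWDown chord m) : Nat) : Int) := by
    rw [PySem.List.len_eq]
    exact_mod_cast congrArg (fun n : Nat => (n : Int))
      ((pvLen_res chord).trans (pvK_wDown chord m).symm)
  rw [hlen]
  have hsub : -steps - 1 = (((-steps).toNat - 1 : Nat) : Int) := by omega
  have hdm : PySem.Int.divmod? (((-steps).toNat - 1 : Nat) : Int) ((pvK (pvWDown chord m) : Nat) : Int)
      = some (PySem.Int.floordiv (((-steps).toNat - 1 : Nat) : Int) ((pvK (pvWDown chord m) : Nat) : Int),
              PySem.Int.mod (((-steps).toNat - 1 : Nat) : Int) ((pvK (pvWDown chord m) : Nat) : Int)) := by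
    simp [PySem.Int.divmod?, PySem.Int.floordiv, PySem.Int.mod]
    omega
  rw [PySem.Int.floordiv_natCast, PySem.Int.mod_natCast] at hdm
  rw [hsub, hdm]
  dsimp only
  have hoffs : List.filter
      (fun d => (PySem.Set.ofList (List.map (fun j => PySem.Int.mod j 7) chord)).contains
        (PySem.Int.mod (m + -d) 7)) (PySem.List.pyRange 1 8 1)
      = (pvOffs (pvWDown chord m)).map (fun (n : Nat) => (n : Int)) := by
    refine pvOffs_filter _ _ (fun j => ?_)
    show (PySem.Set.ofList (List.map (fun j => PySem.Int.mod j 7) chord)).contains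
        (PySem.Int.mod (m + -((j.val : Int) + 1)) 7) = pvWDown chord m j
    rw [show m + -((j.val : Int) + 1) = m - 1 - (j.val : Int) by ring]
    unfold pvWDown stepChord.hitA
    simp [PySem.Set.contains, PySem.Set.mem_ofList]
  rw [hoffs]
  have hget : PySem.List.pyGetD ((pvOffs (pvWDown chord m)).map (fun (n : Nat) => (n : Int)))
      ((((-steps).toNat - 1) % pvK (pvWDown chord m) : Nat) : Int) 0
      = (((pvOffs (pvWDown chord m)).getD (((-steps).toNat - 1) % pvK (pvWDown chord m)) 0 : Nat) : Int) := by
    rw [PySem.List.pyGetD_natCast]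
    exact pvGetD_map_cast _ _
  rw [hget]
  have hsplit : (-steps).toNat
      = ((-steps).toNat - 1) / pvK (pvWDown chord m) * pvK (pvWDown chord m)
        + ((-steps).toNat - 1) % pvK (pvWDown chord m) + 1 := by
    have := Nat.div_add_mod ((-steps).toNat - 1) (pvK (pvWDown chord m))
    have hcomm := Nat.mul_comm (((-steps).toNat - 1) / pvK (pvWDown chord m)) (pvK (pvWDown chord m))
    omega
  conv_rhs => rw [hsplit, pvFormula _ _ _ (Nat.mod_lt _ hk)]
  push_cast
  ring

-- ===== VERDICT (by name: the statement is the Claim_ definition above) =====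
theorem stepChord_spec : Claim_equal_stepChord := by
  intro old_note steps chord _ hpre
  unfold Spec_stepChord
  by_cases h0 : steps = 0
  · subst h0
    simp [stepChord, stepChord_alt]
  · have hc : chord ≠ [] := hpre.resolve_left h0
    rcases lt_or_gt_of_ne h0 with hneg | hpos
    · rw [pvA_down chord steps old_note hneg hc, pvAlt_down chord steps old_note hneg hc]
    · rw [pvA_up chord steps old_note hpos hc, pvAlt_up chord steps old_note hpos hc]
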